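-- pv_equiv track=rewrite | github.com/ianphil/prompts | spikes/parse_gitdif.py | parse_git_diff
-- ===== SOURCE A (Python) =====
-- def parse_git_diff(diff_text: str) -> dict:
--     """
--     Parse a git diff output into a dictionary of files and their changes.
--
--     Args:
--         diff_text (str): Git diff output text
--
--     Returns:
--         dict: Dictionary with filenames as keys and their changes as values
--     """
--     files = {}
--     current_file = None
--     current_content = []
--
--     for line in diff_text.split('\n'):
--         if line.startswith('diff --git'):
--             # Save previous file content if exists
--             if current_file:
--                 files[current_file] = '\n'.join(current_content)
--                 current_content = []
--
--             # Extract new filename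
--             current_file = line.split(' b/')[-1]
--
--         elif current_file:
--             current_content.append(line)
--
--     # Add the last file
--     if current_file and current_content:
--         files[current_file] = '\n'.join(current_content)
--
--     return files
-- ===== SOURCE B (Python) =====
-- def parse_git_diff(diff_text: str) -> dict:
--     """Parse a git diff into {filename: changes} by cutting the line list into
--     header-delimited sections: skip any preamble, then for each 'diff --git'
--     header take the lines up to the next header as that file's content."""
--     lines = diff_text.split('\n')
--     n = len(lines)
--     files = {}
--     pos = 0
--     while pos < n and not lines[pos].startswith('diff --git'):
--         pos += 1
--     while pos < n:
--         end = pos + 1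
--         while end < n and not lines[end].startswith('diff --git'):
--             end += 1
--         files[lines[pos].split(' b/')[-1]] = '\n'.join(lines[pos + 1:end])
--         pos = end
--     return files
-- ===== Notes on version B (the rewrite author's own statement) =====
-- stated objective: alternative
-- what changed: B replaces A's line-by-line state machine (current_file/current_content accumulators plus a duplicated end-of-loop flush) with a section-cutting pass that skips the preamble and, for each header, scans to the next header and inserts the section's name and joined body uniformly, with no carried state.
-- intended difference: On inputs whose last line is a 'diff --git' header (last file has no body) or that contain a header whose extracted name is empty (header ending in ' b/'), A silently drops that file (and, for an empty name, swallows its body lines), an accident of its truthiness/flush logic; B uniformly records every section (e.g. name -> ''), which is the intended parse. — e.g. on parse_git_diff("diff --git a/x b/f"): A returns [], B returns [("f", "")]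
import Mathlib
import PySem

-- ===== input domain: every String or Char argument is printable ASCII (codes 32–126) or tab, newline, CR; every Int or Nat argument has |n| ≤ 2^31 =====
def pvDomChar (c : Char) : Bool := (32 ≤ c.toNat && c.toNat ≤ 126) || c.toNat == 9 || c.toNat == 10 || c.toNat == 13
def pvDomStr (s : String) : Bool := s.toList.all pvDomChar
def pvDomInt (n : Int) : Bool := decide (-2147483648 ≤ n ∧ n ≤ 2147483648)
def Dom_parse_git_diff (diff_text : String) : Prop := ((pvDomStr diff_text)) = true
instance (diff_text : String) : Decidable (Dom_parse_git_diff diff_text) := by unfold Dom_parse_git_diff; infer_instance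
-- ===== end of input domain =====

-- B replaces A's line-by-line state machine with a section-cutting pass over the same split lines (alternative decomposition); A accidentally drops a last file with no body and files with empty extracted names, stated as D_ below.


-- shared helpers: both Pythons test line.startswith('diff --git') and compute line.split(' b/')[-1]
def pvIsHead (l : String) : Bool := PySem.Str.startswith l "diff --git"
def pvNameOf (l : String) : String := ((PySem.Str.split? l " b/").getD [l]).getLastD ""

-- ===== PORT A =====
-- Python truthiness of current_file (None or '' are falsy)
def pvTruthy (cf : Option String) : Bool :=
  match cf with
  | none => false
  | some s => s ≠ ""

-- one iteration of A's for-loop over (files, current_file, current_content)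
def pvStepA (st : PySem.Dict String String × Option String × List String) (line : String) :
    PySem.Dict String String × Option String × List String :=
  let (files, cf, content) := st
  if pvIsHead line then
    if pvTruthy cf then
      ((files.insert (cf.getD "") (PySem.Str.join "\n" content), some (pvNameOf line), []) :
        PySem.Dict String String × Option String × List String)
    else (files, some (pvNameOf line), content)
  else if pvTruthy cf then (files, cf, content ++ [line])
  else (files, cf, content)

def parse_git_diff (diff_text : String) : List (String × String) :=
  let st := (((PySem.Str.split? diff_text "\n").getD [diff_text])).foldl pvStepA (PySem.Dict.empty, none, [])
  let files := st.1
  let cf := st.2.1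
  let content := st.2.2
  let files := if pvTruthy cf && !content.isEmpty then files.insert (cf.getD "") (PySem.Str.join "\n" content) else files
  files.items

-- ===== PORT B =====
-- B's outer while loop: consume one header-delimited section at a time
-- (fuel = number of remaining lines bounds the while loop; it only makes the recursion total)
def pvGoB (fuel : Nat) (files : PySem.Dict String String) (ls : List String) : PySem.Dict String String :=
  match fuel, ls with
  | _, [] => files
  | 0, _ => files
  | fuel + 1, header :: rest =>
    let body := rest.takeWhile (fun l => !pvIsHead l)
    pvGoB fuel (files.insert (pvNameOf header) (PySem.Str.join "\n" body))
      (rest.dropWhile (fun l => !pvIsHead l))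

def parse_git_diff_alt (diff_text : String) : List (String × String) :=
  let lines := ((PySem.Str.split? diff_text "\n").getD [diff_text])
  (pvGoB lines.length PySem.Dict.empty (lines.dropWhile (fun l => !pvIsHead l))).items

-- ===== PRECONDITION & SPEC =====
-- On inputs whose last line is a 'diff --git' header (last file has no body) or that contain a header
-- whose extracted name is empty (header ending in ' b/'), A silently drops that file (and, for an empty
-- name, swallows its body lines) — an accident of its truthiness/flush logic; B uniformly records every
-- section (name -> joined body, possibly ''), which is the intended parse.
def D_parse_git_diff (diff_text : String) : Prop :=
  let lines := ((PySem.Str.split? diff_text "\n").getD [diff_text])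
  (∃ l ∈ lines, pvIsHead l = true ∧ pvNameOf l = "") ∨
  (∃ l ∈ lines.getLast?, pvIsHead l = true)
instance (diff_text : String) : Decidable (D_parse_git_diff diff_text) := by unfold D_parse_git_diff; infer_instance

def Spec_parse_git_diff (diff_text : String) (out : List (String × String)) : Prop := ¬ D_parse_git_diff diff_text → out = parse_git_diff_alt diff_text
instance (diff_text : String) (out : List (String × String)) : Decidable (Spec_parse_git_diff diff_text out) := by unfold Spec_parse_git_diff; infer_instance

def pvDiffWitness_parse_git_diff : String := "diff --git a/x b/f"
def pvDiffWitnessOut_parse_git_diff : (List (String × String)) × (List (String × String)) := ([], [("f", "")])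

-- ===== CLAIM (what is proved, stated in full; the proofs are below) =====
def Claim_unchanged_parse_git_diff : Prop := ∀ (diff_text : String), Dom_parse_git_diff diff_text → Spec_parse_git_diff diff_text (parse_git_diff diff_text)
def Claim_changed_parse_git_diff : Prop := Dom_parse_git_diff (pvDiffWitness_parse_git_diff) ∧ D_parse_git_diff (pvDiffWitness_parse_git_diff) ∧ parse_git_diff (pvDiffWitness_parse_git_diff) = pvDiffWitnessOut_parse_git_diff.1 ∧ parse_git_diff_alt (pvDiffWitness_parse_git_diff) = pvDiffWitnessOut_parse_git_diff.2 ∧ pvDiffWitnessOut_parse_git_diff.1 ≠ pvDiffWitnessOut_parse_git_diff.2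

-- ===== LEMMAS AND PROOFS =====

-- A's final "save the last file" step, applied to the loop state
def pvPostA (st : PySem.Dict String String × Option String × List String) : PySem.Dict String String :=
  if pvTruthy st.2.1 && !st.2.2.isEmpty then st.1.insert (st.2.1.getD "") (PySem.Str.join "\n" st.2.2) else st.1

-- a nonempty suffix has the same last element
theorem pvGetLast?_of_suffix {α : Type} {s t : List α} (h : s <:+ t) (hs : s ≠ []) :
    s.getLast? = t.getLast? := by
  obtain ⟨u, rfl⟩ := h
  rw [List.getLast?_append]
  cases hl : s.getLast? with
  | none => exact absurd (List.getLast?_eq_none_iff.mp hl) hs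
  | some x => rfl

-- with a truthy current_file, non-header lines are appended to current_content
theorem pvFoldA_append (body : List String) (tail : List String)
    (d : PySem.Dict String String) (cf : Option String) (c : List String)
    (hb : ∀ l ∈ body, pvIsHead l = false) (hcf : pvTruthy cf = true) :
    List.foldl pvStepA (d, cf, c) (body ++ tail) = List.foldl pvStepA (d, cf, c ++ body) tail := by
  induction body generalizing c with
  | nil => simp
  | cons l ls ih =>
    have hl : pvIsHead l = false := hb l (by simp)
    simp only [List.cons_append, List.foldl_cons, pvStepA, hl, hcf, Bool.false_eq_true, if_false,
      if_true]
    rw [ih (c ++ [l]) (fun x hx => hb x (List.mem_cons_of_mem _ hx))]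
    simp

-- main simulation: outside the D_ conditions, A's loop started with a falsy current_file
-- computes B's section recursion
theorem pvMain (n : Nat) (lines : List String) (hn : lines.length ≤ n)
    (fuel : Nat) (hf : lines.length ≤ fuel)
    (d : PySem.Dict String String) (cf : Option String) (hcf : pvTruthy cf = false)
    (hH1 : ∀ l ∈ lines, pvIsHead l = true → pvNameOf l ≠ "")
    (hH2 : ∀ l ∈ lines.getLast?, pvIsHead l = false) :
    pvPostA (List.foldl pvStepA (d, cf, []) lines) =
      pvGoB fuel d (lines.dropWhile (fun l => !pvIsHead l)) := by
  induction n generalizing lines fuel d cf with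
  | zero =>
    have : lines = [] := List.eq_nil_of_length_eq_zero (Nat.le_zero.mp hn)
    subst this; cases fuel <;> simp [pvGoB, pvPostA, hcf]
  | succ n ih =>
    cases lines with
    | nil => cases fuel <;> simp [pvGoB, pvPostA, hcf]
    | cons l rest =>
      have hrestlen : rest.length ≤ n := by
        simpa using Nat.lt_succ_iff.mp (Nat.lt_of_lt_of_le (by simp) hn)
      have hH1rest : ∀ x ∈ rest, pvIsHead x = true → pvNameOf x ≠ "" :=
        fun x hx => hH1 x (by simp [hx])
      have hH2rest : ∀ x ∈ rest.getLast?, pvIsHead x = false := by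
        intro x hx
        have hne : rest ≠ [] := by
          intro h; subst h; simp at hx
        have heq : rest.getLast? = (l :: rest).getLast? :=
          pvGetLast?_of_suffix (List.suffix_cons l rest) hne
        exact hH2 x (heq ▸ hx)
      by_cases hl : pvIsHead l = true
      · rw [List.dropWhile_cons_of_neg (by simp [hl])]
        have hname : pvNameOf l ≠ "" := hH1 l (by simp) hl
        have htruthy : pvTruthy (some (pvNameOf l)) = true := by simp [pvTruthy, hname]
        simp only [List.foldl_cons, pvStepA, hl, if_true, hcf, Bool.false_eq_true, if_false]
        obtain ⟨k, rfl⟩ : ∃ k, fuel = k + 1 := ⟨fuel - 1, by simp at hf; omega⟩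
        have hfk : rest.length ≤ k := by simp at hf; omega
        rw [pvGoB]
        set body := rest.takeWhile (fun l => !pvIsHead l) with hbody
        set rest' := rest.dropWhile (fun l => !pvIsHead l) with hrest'
        have hbodyhead : ∀ x ∈ body, pvIsHead x = false := by
          intro x hx
          have := List.mem_takeWhile_imp (hbody ▸ hx)
          simpa using this
        have h1 : rest'.length ≤ rest.length := hrest' ▸ List.length_dropWhile_le _ rest
        have hlen' : rest'.length ≤ n := by omega
        have hxfact : ∀ x xs, rest' = x :: xs → pvIsHead x = true := by
          intro x xs hxx
          have := List.head?_dropWhile_not (fun l => !pvIsHead l) rest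
          rw [← hrest', hxx] at this; simpa using this
        have hsplit : body ++ rest' = rest := by
          rw [hbody, hrest']; exact List.takeWhile_append_dropWhile
        have hsuf : rest' <:+ rest := hrest' ▸ List.dropWhile_suffix _
        clear_value body rest'
        rw [← hsplit, pvFoldA_append body rest' d _ [] hbodyhead htruthy]
        simp only [List.nil_append]
        cases h : rest' with
        | nil =>
          -- last section: by hH2 the header is not the last line, so the body is nonempty
          subst h
          have hbodyrest : body = rest := by simpa using hsplit
          have hbodyne : body ≠ [] := by
            intro hb
            subst hbodyrest
            rw [hb] at hH2
            exact absurd hl (by simpa using hH2 l (by simp))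
          simp only [List.foldl_nil, pvPostA, htruthy]
          cases k <;> simp [pvGoB, hbodyne, Option.getD]
        | cons x xs =>
          have hx : pvIsHead x = true := hxfact x xs h
          subst h
          rw [List.foldl_cons]
          have hstep : pvStepA (d, some (pvNameOf l), body) x =
              (d.insert (pvNameOf l) (PySem.Str.join "\n" body), some (pvNameOf x), []) := by
            simp [pvStepA, hx, htruthy, Option.getD]
          rw [hstep]
          have hback : List.foldl pvStepA
              (d.insert (pvNameOf l) (PySem.Str.join "\n" body), some (pvNameOf x), []) xs =
              List.foldl pvStepA
                (d.insert (pvNameOf l) (PySem.Str.join "\n" body), none, []) (x :: xs) := by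
            rw [List.foldl_cons]
            simp [pvStepA, hx, pvTruthy]
          have hH1' : ∀ y ∈ x :: xs, pvIsHead y = true → pvNameOf y ≠ "" := by
            intro y hy
            exact hH1rest y (hsuf.subset hy)
          have hH2' : ∀ y ∈ (x :: xs).getLast?, pvIsHead y = false := by
            intro y hy
            exact hH2rest y (by rw [← pvGetLast?_of_suffix hsuf (by simp)]; exact hy)
          have hfk' : (x :: xs).length ≤ k := by
            have : (x :: xs).length ≤ rest.length := h1
            omega
          rw [hback, ih (x :: xs) hlen' k hfk' _ none rfl hH1' hH2']
          rw [List.dropWhile_cons_of_neg (by simp [hx])]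
      · have hl' : pvIsHead l = false := by simpa using hl
        rw [List.dropWhile_cons_of_pos (by simp [hl'])]
        simp only [List.foldl_cons, pvStepA, hl', Bool.false_eq_true, if_false, hcf]
        exact ih rest hrestlen fuel (by simp at hf; omega) d cf hcf hH1rest hH2rest

-- ===== VERDICT (by name: the statement is the Claim_ definition above) =====
theorem parse_git_diff_spec : Claim_unchanged_parse_git_diff := by
  intro diff_text _ hD
  unfold parse_git_diff parse_git_diff_alt
  unfold D_parse_git_diff at hD
  set lines := ((PySem.Str.split? diff_text "\n").getD [diff_text]) with hlines
  have hH1 : ∀ l ∈ lines, pvIsHead l = true → pvNameOf l ≠ "" := by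
    intro l hl hh hnm
    exact hD (Or.inl ⟨l, hl, hh, hnm⟩)
  have hH2 : ∀ l ∈ lines.getLast?, pvIsHead l = false := by
    intro l hl
    by_contra hh
    exact hD (Or.inr ⟨l, hl, by simpa using hh⟩)
  have := pvMain lines.length lines le_rfl lines.length le_rfl PySem.Dict.empty none rfl hH1 hH2
  simp only [pvPostA] at this
  simp only []
  rw [← this]

theorem parse_git_diff_changed : Claim_changed_parse_git_diff := by
  unfold Claim_changed_parse_git_diff; decide
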